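-- pv_equiv track=rewrite | github.com/amo-yotakenoko/lightTracker | define_sign.py | rotate_match
-- ===== SOURCE A (Python) =====
-- def rotate_tuple(t, n):
--     n = n % len(t)
--     rotated = t[n:] + t[:n]
--     return rotated
--
-- def rotate_match(pattern1, pattern2):
--     for i in range(len(pattern1)):
--         reliability=0
--         rotated1= rotate_tuple(pattern1, i)
--         is_match=True
--         for j in range(len(pattern1)):
--             wildcard=rotated1[j]==-1 or pattern2[j]==-1
--
--             if(not wildcard):
--                  reliability+=1
--
--             if (not wildcard and rotated1[j]!=pattern2[j]):
--                 is_match=False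
--                 break
--         if(is_match==True):
--             return reliability
--     return 0
-- ===== SOURCE B (Python) =====
-- def rotate_match(pattern1, pattern2):
--     n = len(pattern1)
--     # forbidden shifts: (k - j) % n is bad when pattern1[k] and pattern2[j]
--     # are both concrete (not -1) and differ
--     bad = {(k - j) % n
--            for j in range(n) if pattern2[j] != -1
--            for k in range(n) if pattern1[k] != -1 and pattern1[k] != pattern2[j]}
--     for i in range(n):
--         if i not in bad:
--             return sum(1 for j in range(n)
--                        if pattern2[j] != -1 and pattern1[(i + j) % n] != -1)
--     return 0
-- ===== Notes on version B (the rewrite author's own statement) =====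
-- stated objective: alternative
-- what changed: Instead of building each rotation and scanning it with a break/flag loop, B precomputes the set of forbidden shifts from every conflicting pair (j,k) of concrete entries, then returns the reliability count of the first shift not in that set.
-- outside the precondition, e.g. on rotate_match([1, 2], [3]): A returns 0, B raises IndexError; on rotate_match([-1], []): A returns 0, B raises IndexError
import Mathlib
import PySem

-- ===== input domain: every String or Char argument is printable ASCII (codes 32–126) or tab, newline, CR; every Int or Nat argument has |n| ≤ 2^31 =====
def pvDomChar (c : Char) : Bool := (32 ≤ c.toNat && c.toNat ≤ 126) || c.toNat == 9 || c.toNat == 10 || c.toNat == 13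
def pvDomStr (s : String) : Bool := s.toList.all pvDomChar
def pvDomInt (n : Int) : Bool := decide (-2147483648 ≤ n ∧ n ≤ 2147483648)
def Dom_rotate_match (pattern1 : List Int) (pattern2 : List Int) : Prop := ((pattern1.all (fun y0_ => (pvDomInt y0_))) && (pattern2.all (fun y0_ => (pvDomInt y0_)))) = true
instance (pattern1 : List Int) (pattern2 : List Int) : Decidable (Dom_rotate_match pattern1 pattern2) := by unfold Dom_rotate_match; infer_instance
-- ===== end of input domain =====

-- B replaces A's rotation-building scan (with break/flag) by a precomputed set of
-- forbidden shifts derived from conflicting pairs; same O(n^2) cost, different algorithm.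
-- ===== PORT A =====
def rotate_tuple (t : List Int) (n : Int) : List Int :=
  let m := PySem.Int.mod n (t.length : Int)
  PySem.List.slice t (some m) none ++ PySem.List.slice t none (some m)

-- inner 'for j' loop of A: carries (reliability, is_match); break = returning false
def rmA_inner (r1 p2 : List Int) : List Nat → Int → Int × Bool
  | [], rel => (rel, true)
  | j :: js, rel =>
    let a := PySem.List.pyGetD r1 (j : Int) 0
    let b := PySem.List.pyGetD p2 (j : Int) 0
    let wildcard : Bool := (a == -1) || (b == -1)
    let rel' := if !wildcard then rel + 1 else rel
    if !wildcard && (a != b) then (rel', false)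
    else rmA_inner r1 p2 js rel'

-- outer 'for i' loop of A: first matching rotation returns its reliability
def rmA_outer (p1 p2 : List Int) : List Nat → Int
  | [] => 0
  | i :: is =>
    let rotated1 := rotate_tuple p1 (i : Int)
    let r := rmA_inner rotated1 p2 (List.range p1.length) 0
    if r.2 then r.1 else rmA_outer p1 p2 is

def rotate_match (pattern1 : List Int) (pattern2 : List Int) : Int :=
  rmA_outer pattern1 pattern2 (List.range pattern1.length)

-- ===== PORT B =====
-- the set comprehension of Source B: forbidden shifts (k - j) % n over conflicting pairs
def rmB_bad (p1 p2 : List Int) (n : Nat) : PySem.Set Int :=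
  PySem.Set.ofList ((List.range n).flatMap (fun j =>
    if PySem.List.pyGetD p2 (j : Int) 0 ≠ -1 then
      (List.range n).filterMap (fun k =>
        let a := PySem.List.pyGetD p1 (k : Int) 0
        if a ≠ -1 ∧ a ≠ PySem.List.pyGetD p2 (j : Int) 0 then
          some (PySem.Int.mod ((k : Int) - (j : Int)) (n : Int))
        else none)
    else []))

-- sum(1 for j in range(n) if ...)
def rmB_rel (p1 p2 : List Int) (n : Nat) (i : Nat) : Int :=
  (List.range n).foldl (fun acc (j : Nat) =>
    if PySem.List.pyGetD p2 (j : Int) 0 ≠ -1 ∧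
       PySem.List.pyGetD p1 (PySem.Int.mod ((i : Int) + (j : Int)) (n : Int)) 0 ≠ -1
    then acc + 1 else acc) 0

-- 'for i in range(n): if i not in bad: return …'
def rmB_loop (p1 p2 : List Int) (n : Nat) (bad : PySem.Set Int) : List Nat → Int
  | [] => 0
  | i :: is =>
    if PySem.Set.contains bad (i : Int) then rmB_loop p1 p2 n bad is
    else rmB_rel p1 p2 n i

def rotate_match_alt (pattern1 : List Int) (pattern2 : List Int) : Int :=
  let n := pattern1.length
  rmB_loop pattern1 pattern2 n (rmB_bad pattern1 pattern2 n) (List.range n)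

-- ===== PRECONDITION & SPEC =====
-- Pre_ excludes inputs with len(pattern1) > len(pattern2): there A raises IndexError on
-- some of them and on the others returns a value that depends accidentally on where the
-- inner scan happens to break before reaching the out-of-range index.
def Pre_rotate_match (pattern1 : List Int) (pattern2 : List Int) : Prop :=
  pattern1.length ≤ pattern2.length
instance (pattern1 : List Int) (pattern2 : List Int) : Decidable (Pre_rotate_match pattern1 pattern2) := by unfold Pre_rotate_match; infer_instance
def pvWitness_rotate_match : List Int × List Int := ([1, -1, 2], [2, 1, -1])

def Spec_rotate_match (pattern1 : List Int) (pattern2 : List Int) (out : Int) : Prop := out = rotate_match_alt pattern1 pattern2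
instance (pattern1 : List Int) (pattern2 : List Int) (out : Int) : Decidable (Spec_rotate_match pattern1 pattern2 out) := by unfold Spec_rotate_match; infer_instance

-- ===== CLAIM (what is proved, stated in full; the proofs are below) =====
def Claim_equal_rotate_match : Prop := ∀ (pattern1 : List Int) (pattern2 : List Int), Dom_rotate_match pattern1 pattern2 → Pre_rotate_match pattern1 pattern2 → Spec_rotate_match pattern1 pattern2 (rotate_match pattern1 pattern2)

-- ===== LEMMAS AND PROOFS =====

-- boolean predicates matching A's inner-loop tests
def okAf (r1 p2 : List Int) (j : Nat) : Bool :=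
  ((PySem.List.pyGetD r1 (j : Int) 0 == -1) || (PySem.List.pyGetD p2 (j : Int) 0 == -1)) ||
    (PySem.List.pyGetD r1 (j : Int) 0 == PySem.List.pyGetD p2 (j : Int) 0)

def nwf (r1 p2 : List Int) (j : Nat) : Bool :=
  !((PySem.List.pyGetD r1 (j : Int) 0 == -1) || (PySem.List.pyGetD p2 (j : Int) 0 == -1))

theorem rmA_inner_snd (r1 p2 : List Int) (js : List Nat) (rel : Int) :
    (rmA_inner r1 p2 js rel).2 = js.all (okAf r1 p2) := by
  induction js generalizing rel with
  | nil => simp [rmA_inner]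
  | cons j js ih =>
    simp only [rmA_inner, List.all_cons, okAf, PySem.List.pyGetD_natCast]
    by_cases ha : r1[j]?.getD 0 = -1 <;>
      by_cases hb : p2[j]?.getD 0 = -1 <;>
        by_cases hab : r1[j]?.getD 0 = p2[j]?.getD 0 <;>
          simp [ha, hb, hab, ih]

theorem rmA_inner_fst (r1 p2 : List Int) (js : List Nat) (rel : Int)
    (h : js.all (okAf r1 p2) = true) :
    (rmA_inner r1 p2 js rel).1 = rel + (js.countP (nwf r1 p2) : Int) := by
  induction js generalizing rel with
  | nil => simp [rmA_inner]
  | cons j js ih =>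
    simp only [List.all_cons, Bool.and_eq_true] at h
    obtain ⟨h1, h2⟩ := h
    simp only [rmA_inner, List.countP_cons, PySem.List.pyGetD_natCast]
    by_cases ha : r1[j]?.getD 0 = -1 <;>
      by_cases hb : p2[j]?.getD 0 = -1 <;>
        by_cases hab : r1[j]?.getD 0 = p2[j]?.getD 0 <;>
          simp_all [okAf, nwf] <;> omega

-- counting fold of B is countP
theorem foldl_count_aux (p : Nat → Prop) [DecidablePred p] (l : List Nat) (acc : Int) :
    l.foldl (fun acc j => if p j then acc + 1 else acc) acc
      = acc + (l.countP (fun j => decide (p j)) : Int) := by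
  induction l generalizing acc with
  | nil => simp
  | cons j l ih =>
    simp only [List.foldl_cons, List.countP_cons, ih]
    by_cases h : p j <;> simp [h] <;> push_cast <;> ring

theorem mem_rmB_bad (p1 p2 : List Int) (n : Nat) (x : Int) :
    x ∈ rmB_bad p1 p2 n ↔
      ∃ j, j < n ∧ PySem.List.pyGetD p2 (j : Int) 0 ≠ -1 ∧
        ∃ k, k < n ∧ PySem.List.pyGetD p1 (k : Int) 0 ≠ -1 ∧
          PySem.List.pyGetD p1 (k : Int) 0 ≠ PySem.List.pyGetD p2 (j : Int) 0 ∧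
          PySem.Int.mod ((k : Int) - (j : Int)) (n : Int) = x := by
  unfold rmB_bad
  rw [PySem.Set.mem_ofList]
  simp [Option.ite_none_right_eq_some]
  exact ⟨fun ⟨j,hj,hb,k,hk,⟨h1,h2⟩,hx⟩ => ⟨j,hj,hb,k,hk,h1,h2,hx⟩,
         fun ⟨j,hj,hb,k,hk,h1,h2,hx⟩ => ⟨j,hj,hb,k,hk,⟨h1,h2⟩,hx⟩⟩

theorem mod_shift_iff (n i j k : Nat) (hi : i < n) (hj : j < n) (hk : k < n) :
    PySem.Int.mod ((k : Int) - (j : Int)) (n : Int) = (i : Int) ↔ k = (i + j) % n := by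
  have hn : (0:Int) < (n:Int) := by exact_mod_cast Nat.pos_of_ne_zero (by omega)
  rw [PySem.Int.mod_eq_emod_of_pos hn]
  have hcast : (((i + j) % n : Nat) : Int) = ((i:Int) + (j:Int)) % (n:Int) := by push_cast; ring
  constructor
  · intro h
    have h1 : Int.ModEq (n:Int) ((k:Int) - j) (i:Int) := by
      unfold Int.ModEq
      rw [h, Int.emod_eq_of_lt (by omega) (by omega)]
    have h2 : Int.ModEq (n:Int) (k:Int) ((i:Int) + j) := by
      have := Int.ModEq.add_right (j:Int) h1
      simpa using this
    have h3 : (k:Int) = ((i:Int) + j) % n := by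
      have h2' : (k:Int) % n = ((i:Int) + j) % n := h2
      rwa [Int.emod_eq_of_lt (by omega) (by omega)] at h2'
    have : (k:Int) = (((i + j) % n : Nat) : Int) := by rw [h3, hcast]
    exact_mod_cast this
  · intro h
    subst h
    have hm : Int.ModEq (n:Int) ((((i:Int) + j) % n) - j) ((i:Int) + j - j) :=
      Int.ModEq.sub_right _ (Int.emod_emod_of_dvd _ dvd_rfl)
    have hm' : (((i:Int) + j) % n - j) % n = ((i:Int) + j - j) % n := hm
    rw [hcast, hm']
    have : (i:Int) + j - j = (i:Int) := by ring
    rw [this, Int.emod_eq_of_lt (by omega) (by omega)]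

theorem rotate_tuple_eq (p1 : List Int) (i : Nat) (hi : i < p1.length) :
    rotate_tuple p1 (i : Int) = p1.rotate i := by
  simp only [rotate_tuple]
  rw [PySem.Int.mod_natCast, Nat.mod_eq_of_lt hi, PySem.List.slice_from_natCast,
    PySem.List.slice_to_natCast, List.rotate_eq_drop_append_take hi.le]

theorem getD_rotate (p1 : List Int) (i j : Nat) (hi : i < p1.length) (hj : j < p1.length) :
    (p1.rotate i).getD j 0 = p1.getD ((i + j) % p1.length) 0 := by
  have hj' : j < (p1.rotate i).length := by simpa using hj
  have h2 : (i + j) % p1.length < p1.length := Nat.mod_lt _ (by omega)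
  rw [List.getD_eq_getElem _ _ hj', List.getElem_rotate, Nat.add_comm j i,
    List.getD_eq_getElem _ _ h2]

-- core per-shift bridge: i is a bad shift iff A's rotated scan finds a conflict
theorem bad_iff_not_all (p1 p2 : List Int) (i : Nat) (hi : i < p1.length)
    (hpre : p1.length ≤ p2.length) :
    ((i : Int) ∈ rmB_bad p1 p2 p1.length) ↔
      ¬ ((List.range p1.length).all (okAf (rotate_tuple p1 (i : Int)) p2) = true) := by
  rw [mem_rmB_bad, List.all_eq_true, rotate_tuple_eq p1 i hi]
  constructor
  · rintro ⟨j, hj, hb, k, hk, h1, h2, hx⟩ hall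
    rw [mod_shift_iff p1.length i j k hi hj hk] at hx
    subst hx
    have hok := hall j (List.mem_range.mpr hj)
    simp only [okAf, PySem.List.pyGetD_natCast, Bool.or_eq_true, beq_iff_eq] at hok
    rw [getD_rotate p1 i j hi hj] at hok
    simp only [PySem.List.pyGetD_natCast] at hb h1 h2
    tauto
  · intro hnall
    by_contra hno
    apply hnall
    intro j hjm
    have hj := List.mem_range.mp hjm
    simp only [okAf, PySem.List.pyGetD_natCast, Bool.or_eq_true, beq_iff_eq]
    rw [getD_rotate p1 i j hi hj]
    by_contra hc
    push_neg at hc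
    obtain ⟨⟨ha, hb⟩, hab⟩ := hc
    exact hno ⟨j, hj, by rw [PySem.List.pyGetD_natCast]; exact hb,
      (i + j) % p1.length, Nat.mod_lt _ (by omega),
      by rw [PySem.List.pyGetD_natCast]; exact ha,
      by rw [PySem.List.pyGetD_natCast, PySem.List.pyGetD_natCast]; exact hab,
      (mod_shift_iff p1.length i j _ hi hj (Nat.mod_lt _ (by omega))).mpr rfl⟩

theorem rel_eq (p1 p2 : List Int) (i : Nat) (hi : i < p1.length)
    (hpre : p1.length ≤ p2.length) :
    rmB_rel p1 p2 p1.length i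
      = 0 + ((List.range p1.length).countP (nwf (rotate_tuple p1 (i : Int)) p2) : Int) := by
  unfold rmB_rel
  rw [foldl_count_aux]
  congr 2
  apply List.countP_congr
  intro j hjm
  have hj := List.mem_range.mp hjm
  have hmod : PySem.Int.mod ((i : Int) + (j : Int)) (p1.length : Int)
      = (((i + j) % p1.length : Nat) : Int) := by
    rw [show (i : Int) + (j : Int) = ((i + j : Nat) : Int) by push_cast; ring,
      PySem.Int.mod_natCast]
  simp only [nwf, PySem.List.pyGetD_natCast, hmod, rotate_tuple_eq p1 i hi]
  rw [getD_rotate p1 i j hi hj]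
  by_cases ha : p1.getD ((i + j) % p1.length) 0 = -1 <;>
    by_cases hb : p2.getD j 0 = -1 <;> simp [ha, hb, and_comm]

theorem loops_eq (p1 p2 : List Int) (hpre : p1.length ≤ p2.length) (is : List Nat)
    (his : ∀ i ∈ is, i < p1.length) :
    rmA_outer p1 p2 is = rmB_loop p1 p2 p1.length (rmB_bad p1 p2 p1.length) is := by
  induction is with
  | nil => rfl
  | cons i is ih =>
    have hi : i < p1.length := his i (List.mem_cons_self ..)
    have hrest : ∀ i' ∈ is, i' < p1.length := fun i' h => his i' (List.mem_cons_of_mem _ h)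
    have hcont : PySem.Set.contains (rmB_bad p1 p2 p1.length) (i : Int)
        = !((List.range p1.length).all (okAf (rotate_tuple p1 (i : Int)) p2)) := by
      by_cases h : (List.range p1.length).all (okAf (rotate_tuple p1 (i : Int)) p2) = true
      · have hmem : ¬ (i : Int) ∈ rmB_bad p1 p2 p1.length := by
          rw [bad_iff_not_all p1 p2 i hi hpre]; exact fun hc => hc h
        have hcf : PySem.Set.contains (rmB_bad p1 p2 p1.length) (i : Int) = false := by
          rcases Bool.eq_false_or_eq_true (PySem.Set.contains (rmB_bad p1 p2 p1.length) (i : Int)) with hc | hc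
          · exact absurd ((PySem.Set.contains_iff _ _).mp hc) hmem
          · exact hc
        rw [hcf, h]; rfl
      · have h' : (List.range p1.length).all (okAf (rotate_tuple p1 (i : Int)) p2) = false := by
          revert h
          cases (List.range p1.length).all (okAf (rotate_tuple p1 (i : Int)) p2) <;> simp
        have hmem : (i : Int) ∈ rmB_bad p1 p2 p1.length := by
          rw [bad_iff_not_all p1 p2 i hi hpre, h']
          simp
        rw [(PySem.Set.contains_iff _ _).mpr hmem, h']; rfl
    simp only [rmA_outer, rmB_loop]
    rw [rmA_inner_snd, hcont]
    by_cases h : (List.range p1.length).all (okAf (rotate_tuple p1 (i : Int)) p2) = true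
    · rw [h]
      simp only [Bool.not_true, Bool.false_eq_true, if_false, if_true]
      rw [rmA_inner_fst _ _ _ _ h, rel_eq p1 p2 i hi hpre]
    · have h' : (List.range p1.length).all (okAf (rotate_tuple p1 (i : Int)) p2) = false := by
        revert h
        cases (List.range p1.length).all (okAf (rotate_tuple p1 (i : Int)) p2) <;> simp
      rw [h']
      simp only [Bool.not_false, Bool.false_eq_true, if_false, if_true]
      exact ih hrest

-- ===== VERDICT (by name: the statement is the Claim_ definition above) =====
theorem rotate_match_spec : Claim_equal_rotate_match := by
  intro p1 p2 _ hpre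
  unfold Pre_rotate_match at hpre
  show rmA_outer p1 p2 (List.range p1.length)
      = rmB_loop p1 p2 p1.length (rmB_bad p1 p2 p1.length) (List.range p1.length)
  exact loops_eq p1 p2 hpre (List.range p1.length) (fun i h => List.mem_range.mp h)
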